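-- pv_equiv track=rewrite | github.com/pyrocko/pyrocko | src/response.py | finalize_construction
-- ===== SOURCE A (Python) =====
-- def finalize_construction(breakpoints):
--     breakpoints.sort()
--     breakpoints_out = []
--     f_last = None
--     for f, c in breakpoints:
--         if f_last is not None and f == f_last:
--             breakpoints_out[-1][1] += c
--         else:
--             breakpoints_out.append([f, c])
--
--         f_last = f
--
--     breakpoints_out = [(f, c) for (f, c) in breakpoints_out if c != 0]
--     return breakpoints_out
-- ===== SOURCE B (Python) =====
-- def finalize_construction(breakpoints):
--     # Hash aggregation instead of sort-and-merge-adjacent: sum the coefficients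
--     # per frequency in one pass over the (unsorted) input, then emit the
--     # non-zero totals in increasing frequency order.  Only the distinct
--     # frequencies are sorted; the input list is not sorted in place.
--     sums = {}
--     for f, c in breakpoints:
--         sums[f] = sums.get(f, 0) + c
--     return [(f, sums[f]) for f in sorted(sums) if sums[f] != 0]
-- ===== Notes on version B (the rewrite author's own statement) =====
-- stated objective: alternative
-- what changed: Replaces sort-the-whole-list-then-merge-adjacent-runs with hash aggregation: one dict pass sums coefficients per frequency over the unsorted input and only the distinct keys are sorted for output; B does not sort the input list in place (return values are identical).
import Mathlib
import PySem

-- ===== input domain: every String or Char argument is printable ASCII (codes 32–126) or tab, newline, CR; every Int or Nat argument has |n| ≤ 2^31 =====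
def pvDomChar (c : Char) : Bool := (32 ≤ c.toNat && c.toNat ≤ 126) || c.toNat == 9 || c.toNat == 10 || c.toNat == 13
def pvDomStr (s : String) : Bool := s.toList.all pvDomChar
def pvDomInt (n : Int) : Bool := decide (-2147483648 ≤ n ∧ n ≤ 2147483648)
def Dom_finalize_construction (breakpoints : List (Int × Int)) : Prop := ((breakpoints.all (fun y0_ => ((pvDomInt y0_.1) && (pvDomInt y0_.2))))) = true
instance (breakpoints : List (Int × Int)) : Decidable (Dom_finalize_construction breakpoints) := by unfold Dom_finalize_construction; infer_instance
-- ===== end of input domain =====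

-- B replaces A's sort-then-merge-adjacent-runs with hash aggregation (a dict pass
-- summing coefficients per frequency, then sorting only the distinct keys); objective: alternative.
-- A sorts the argument list in place, B does not; equivalence here is about the return value.


-- ===== PORT A =====
-- breakpoints_out[-1][1] += c  (out is nonempty whenever Python reaches this line)
def pvAddLast (xs : List (Int × Int)) (c : Int) : List (Int × Int) :=
  match xs with
  | [] => []
  | [x] => [(x.1, x.2 + c)]
  | x :: rest => x :: pvAddLast rest c

-- one iteration of A's for-loop; state = (breakpoints_out, f_last)
def pvAStep (acc : List (Int × Int) × Option Int) (p : Int × Int) :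
    List (Int × Int) × Option Int :=
  match acc.2 with
  | some fl =>
      if p.1 == fl then (pvAddLast acc.1 p.2, some p.1)
      else (acc.1 ++ [(p.1, p.2)], some p.1)
  | none => (acc.1 ++ [(p.1, p.2)], some p.1)

def finalize_construction (breakpoints : List (Int × Int)) : List (Int × Int) :=
  let bps := PySem.List.sorted2 breakpoints Prod.fst Prod.snd  -- breakpoints.sort(): tuples compare lexicographically
  let res := bps.foldl pvAStep ([], none)
  res.1.filter (fun p => p.2 ≠ 0)

-- ===== PORT B =====
def finalize_construction_alt (breakpoints : List (Int × Int)) : List (Int × Int) :=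
  -- sums = {}; for f, c in breakpoints: sums[f] = sums.get(f, 0) + c
  let sums := breakpoints.foldl (fun d p => d.modify p.1 0 (· + p.2)) (PySem.Dict.empty : PySem.Dict Int Int)
  -- [(f, sums[f]) for f in sorted(sums) if sums[f] != 0]
  ((PySem.List.sorted sums.keys (fun x => x)).filter (fun f => sums.getD f 0 ≠ 0)).map
    (fun f => (f, sums.getD f 0))

-- ===== PRECONDITION & SPEC =====
def Spec_finalize_construction (breakpoints : List (Int × Int)) (out : List (Int × Int)) : Prop := out = finalize_construction_alt breakpoints
instance (breakpoints : List (Int × Int)) (out : List (Int × Int)) : Decidable (Spec_finalize_construction breakpoints out) := by unfold Spec_finalize_construction; infer_instance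

-- ===== CLAIM (what is proved, stated in full; the proofs are below) =====
def Claim_equal_finalize_construction : Prop := ∀ (breakpoints : List (Int × Int)), Dom_finalize_construction breakpoints → Spec_finalize_construction breakpoints (finalize_construction breakpoints)

-- ===== LEMMAS AND PROOFS =====

-- total coefficient weight of frequency f in l
def pvW (l : List (Int × Int)) (f : Int) : Int :=
  ((l.filter (fun p => p.1 == f)).map Prod.snd).sum

theorem pvW_cons (g c f : Int) (l : List (Int × Int)) :
    pvW ((g, c) :: l) f = (if g = f then c else 0) + pvW l f := by
  by_cases h : g = f <;> simp [pvW, h]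

theorem pvW_eq_zero_of_not_mem (l : List (Int × Int)) (f : Int)
    (h : f ∉ l.map Prod.fst) : pvW l f = 0 := by
  have hnil : l.filter (fun p => p.1 == f) = [] := by
    rw [List.filter_eq_nil_iff]
    intro p hp hpf
    exact h (List.mem_map.mpr ⟨p, hp, by simpa using hpf⟩)
  simp [pvW, hnil]

theorem pvW_perm (l l' : List (Int × Int)) (h : l.Perm l') (f : Int) :
    pvW l f = pvW l' f :=
  List.Perm.sum_eq (List.Perm.map _ (List.Perm.filter _ h))

-- canonical front-to-back merge of adjacent equal frequencies, carrying the current group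
def pvMerge1 (f c : Int) : List (Int × Int) → List (Int × Int)
  | [] => [(f, c)]
  | (g, d) :: rest => if g == f then pvMerge1 f (c + d) rest else (f, c) :: pvMerge1 g d rest

theorem pvAddLast_append (out : List (Int × Int)) (f c d : Int) :
    pvAddLast (out ++ [(f, c)]) d = out ++ [(f, c + d)] := by
  induction out with
  | nil => simp [pvAddLast]
  | cons x rest ih =>
      cases rest with
      | nil => simp [pvAddLast]
      | cons y t => simpa [pvAddLast] using ih

-- A's loop, started after the first element, computes the canonical merge
theorem pvALoop_merge (l : List (Int × Int)) :
    ∀ (out : List (Int × Int)) (f c : Int),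
      (l.foldl pvAStep (out ++ [(f, c)], some f)).1 = out ++ pvMerge1 f c l := by
  induction l with
  | nil => intro out f c; simp [pvMerge1]
  | cons p rest ih =>
      intro out f c
      obtain ⟨g, d⟩ := p
      by_cases h : g == f
      · have hgf : g = f := by simpa using h
        subst hgf
        simp only [List.foldl_cons, pvAStep, h, if_pos, pvMerge1, pvAddLast_append]
        exact ih out g (c + d)
      · simp only [List.foldl_cons, pvAStep, h, pvMerge1]
        simp only [Bool.false_eq_true, if_false]
        have h2 := ih (out ++ [(f, c)]) g d
        simp only [List.append_assoc, List.cons_append, List.nil_append] at h2 ⊢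
        exact h2

-- insertBy with a comparator that refines ≤-on-fst preserves sortedness by fst
theorem pvInsertBy_pw (before : (Int × Int) → (Int × Int) → Bool)
    (h1 : ∀ a b, before a b = true → a.1 ≤ b.1)
    (h2 : ∀ a b, before a b = false → b.1 ≤ a.1)
    (x : Int × Int) (ys : List (Int × Int))
    (hp : ys.Pairwise (fun a b => a.1 ≤ b.1)) :
    (PySem.List.insertBy before x ys).Pairwise (fun a b => a.1 ≤ b.1) := by
  induction ys with
  | nil => simp [PySem.List.insertBy]
  | cons y ys ih =>
      rw [List.pairwise_cons] at hp
      obtain ⟨hy, hys⟩ := hp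
      rw [PySem.List.insertBy]
      by_cases hb : before x y = true
      · rw [if_pos hb]
        refine List.Pairwise.cons ?_ (List.Pairwise.cons hy hys)
        intro z hz
        rcases List.mem_cons.mp hz with rfl | hz
        · exact h1 x z hb
        · exact le_trans (h1 x y hb) (hy z hz)
      · rw [if_neg hb]
        refine List.Pairwise.cons ?_ (ih hys)
        intro z hz
        rcases (PySem.List.mem_insertBy before x z ys).mp hz with hz' | hz
        · rw [hz']
          exact h2 x y (by simpa using hb)
        · exact hy z hz

theorem pvSorted2_pairwise (l : List (Int × Int)) :
    (PySem.List.sorted2 l Prod.fst Prod.snd).Pairwise (fun a b => a.1 ≤ b.1) := by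
  have key : ∀ (m : List (Int × Int)) (acc : List (Int × Int)),
      acc.Pairwise (fun a b => a.1 ≤ b.1) →
      (m.foldl (fun acc x => PySem.List.insertBy
        (fun a b => decide (a.1 < b.1) || (!decide (b.1 < a.1) && decide (a.2 < b.2))) x acc) acc).Pairwise
        (fun a b => a.1 ≤ b.1) := by
    intro m
    induction m with
    | nil => intro acc h; exact h
    | cons x rest ih =>
        intro acc h
        refine ih _ (pvInsertBy_pw _ ?_ ?_ x acc h)
        · intro a b hab
          by_cases hlt : a.1 < b.1
          · omega
          · have hlt2 : ¬ b.1 < a.1 := by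
              intro h'
              simp [hlt, h'] at hab
            omega
        · intro a b hab
          by_cases hlt : a.1 < b.1
          · simp [hlt] at hab
          · omega
  exact key l [] List.Pairwise.nil

theorem pvOfList_discard_of_not_mem (K : List Int) (f : Int) (h : f ∉ K) :
    (PySem.Set.ofList K).discard f = PySem.Set.ofList K := by
  apply List.filter_eq_self.mpr
  intro y hy
  have hyK : y ∈ K := (PySem.Set.mem_ofList K y).mp hy
  have hne : y ≠ f := fun hyf => h (hyf ▸ hyK)
  simp [hne]

theorem pvDedup_cons_cons (x : Int) (K : List Int) :
    PySem.List.dedup (x :: x :: K) = PySem.List.dedup (x :: K) := by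
  simp [PySem.List.dedup_eq_ofList, PySem.Set.ofList_cons, PySem.Set.discard,
    List.filter_filter]

theorem pvDedup_cons_of_not_mem (x : Int) (K : List Int) (h : x ∉ K) :
    PySem.List.dedup (x :: K) = x :: PySem.List.dedup K := by
  rw [PySem.List.dedup_eq_ofList, PySem.Set.ofList_cons, pvOfList_discard_of_not_mem K x h,
    PySem.List.dedup_eq_ofList]

-- dedup of a ≤-sorted list of keys is strictly increasing
theorem pvDedupLt (xs : List Int) (h : xs.Pairwise (· ≤ ·)) :
    (PySem.List.dedup xs).Pairwise (· < ·) := by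
  induction xs with
  | nil => simp [PySem.List.dedup, PySem.Set.ofList, PySem.Set.empty]
  | cons x xs ih =>
      rw [List.pairwise_cons] at h
      obtain ⟨hx, hxs⟩ := h
      rw [PySem.List.dedup_eq_ofList, PySem.Set.ofList_cons]
      refine List.Pairwise.cons ?_ ?_
      · intro y hy
        obtain ⟨hy1, hy2⟩ := (PySem.Set.mem_discard _ x y).mp hy
        have hyx : y ∈ xs := (PySem.Set.mem_ofList xs y).mp hy1
        exact lt_of_le_of_ne (hx y hyx) (Ne.symm hy2)
      · have hlt := ih hxs
        rw [PySem.List.dedup_eq_ofList] at hlt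
        exact List.Pairwise.filter _ hlt

-- the head frequency of a fst-sorted list does not reappear in the tail
theorem pvHead_not_mem (f c g d : Int) (rest : List (Int × Int))
    (h : ((f, c) :: (g, d) :: rest).Pairwise (fun a b => a.1 ≤ b.1)) (hgf : g ≠ f) :
    f ∉ ((g, d) :: rest).map Prod.fst := by
  intro hmem
  rw [List.pairwise_cons] at h
  obtain ⟨hf, htail⟩ := h
  rw [List.pairwise_cons] at htail
  obtain ⟨hg, _⟩ := htail
  rcases List.mem_cons.mp hmem with hfg | hmem'
  · exact hgf (by simpa using hfg.symm)
  · obtain ⟨p, hp, hpf⟩ := List.mem_map.mp hmem'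
    have h1 : f ≤ g := hf (g, d) ((by simp))
    have h2 : g ≤ f := hpf ▸ hg p hp
    exact hgf (le_antisymm h2 h1)

-- the canonical merge of a fst-sorted list, characterised by frequencies and weights
theorem pvMerge1_char (s : List (Int × Int)) :
    ∀ (f c : Int), (((f, c) :: s).Pairwise (fun a b => a.1 ≤ b.1)) →
      pvMerge1 f c s =
        (PySem.List.dedup (((f, c) :: s).map Prod.fst)).map (fun g => (g, pvW ((f, c) :: s) g)) := by
  induction s with
  | nil =>
      intro f c _
      simp [pvMerge1, PySem.List.dedup_eq_ofList, PySem.Set.ofList_cons, PySem.Set.ofList,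
        PySem.Set.empty, PySem.Set.discard, pvW]
  | cons p rest ih =>
      intro f c h
      obtain ⟨g, d⟩ := p
      by_cases hgf : g = f
      · subst hgf
        rw [pvMerge1, if_pos (by simp)]
        have htail : ((g, c + d) :: rest).Pairwise (fun a b => a.1 ≤ b.1) := by
          rw [List.pairwise_cons] at h ⊢
          exact ⟨fun z hz => h.1 z (List.mem_cons_of_mem _ hz), (List.pairwise_cons.mp h.2).2⟩
        rw [ih g (c + d) htail]
        have hd : PySem.List.dedup (((g, c) :: (g, d) :: rest).map Prod.fst)
            = PySem.List.dedup (((g, c + d) :: rest).map Prod.fst) := by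
          simp only [List.map_cons]
          exact pvDedup_cons_cons g (rest.map Prod.fst)
        rw [hd]
        refine List.map_congr_left ?_
        intro x _
        rw [pvW_cons, pvW_cons, pvW_cons]
        by_cases hx : g = x <;> simp [hx] <;> ring
      · rw [pvMerge1, if_neg (by simpa using hgf)]
        have hnm : f ∉ ((g, d) :: rest).map Prod.fst := pvHead_not_mem f c g d rest h hgf
        have hd : PySem.List.dedup (((f, c) :: (g, d) :: rest).map Prod.fst)
            = f :: PySem.List.dedup (((g, d) :: rest).map Prod.fst) := by
          simp only [List.map_cons]
          exact pvDedup_cons_of_not_mem f _ (by simpa using hnm)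
        rw [hd, List.map_cons]
        have hhead : pvW ((f, c) :: (g, d) :: rest) f = c := by
          rw [pvW_cons, if_pos rfl, pvW_eq_zero_of_not_mem _ f hnm]
          ring
        rw [hhead]
        have htail : ((g, d) :: rest).Pairwise (fun a b => a.1 ≤ b.1) :=
          (List.pairwise_cons.mp h).2
        rw [ih g d htail]
        congr 1
        refine List.map_congr_left ?_
        intro x hx
        have hxK : x ∈ ((g, d) :: rest).map Prod.fst := by
          have := hx
          rw [PySem.List.dedup_eq_ofList] at this
          exact (PySem.Set.mem_ofList _ x).mp this
        have hxf : f ≠ x := fun hfx => hnm (hfx ▸ hxK)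
        simp [pvW_cons, hxf]

-- B's dict loop computes the weights
theorem pvGetD_fold (l : List (Int × Int)) :
    ∀ (d : PySem.Dict Int Int) (f : Int),
      (l.foldl (fun d p => d.modify p.1 0 (· + p.2)) d).getD f 0 = d.getD f 0 + pvW l f := by
  induction l with
  | nil => intro d f; simp [pvW]
  | cons p rest ih =>
      intro d f
      obtain ⟨g, c⟩ := p
      rw [List.foldl_cons, ih, PySem.Dict.getD_modify, pvW_cons]
      by_cases h : f = g
      · subst h; simp; ring
      · rw [if_neg h, if_neg (fun hh => h hh.symm)]; ring

-- ===== VERDICT (by name: the statement is the Claim_ definition above) =====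
theorem finalize_construction_spec : Claim_equal_finalize_construction := by
  intro l _
  unfold Spec_finalize_construction finalize_construction finalize_construction_alt
  -- B side: keys and values of the aggregation dict
  have hkeys : (l.foldl (fun d p => d.modify p.1 0 (· + p.2)) (PySem.Dict.empty : PySem.Dict Int Int)).keys
      = PySem.Set.ofList (l.map Prod.fst) := by
    have hk := PySem.Dict.keys_foldl_modify_key l Prod.fst 0 (fun _ p => (· + p.2)) PySem.Dict.empty
    simpa [PySem.Set.update, PySem.Set.ofList] using hk
  have hgetD : ∀ f, (l.foldl (fun d p => d.modify p.1 0 (· + p.2)) (PySem.Dict.empty : PySem.Dict Int Int)).getD f 0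
      = pvW l f := by
    intro f
    simpa using pvGetD_fold l PySem.Dict.empty f
  simp only [hkeys, hgetD]
  have hperm : (PySem.List.sorted2 l Prod.fst Prod.snd).Perm l :=
    PySem.List.sorted2_perm l Prod.fst Prod.snd false
  have hpw := pvSorted2_pairwise l
  cases hs : PySem.List.sorted2 l Prod.fst Prod.snd with
  | nil =>
      rw [hs] at hperm
      have hl : l = [] := (List.Perm.symm hperm).eq_nil
      subst hl
      rfl
  | cons p rest =>
      obtain ⟨f, c⟩ := p
      rw [hs] at hpw hperm
      -- A's loop = canonical merge
      have h1 : (((f, c) :: rest).foldl pvAStep ([], none)).1 = pvMerge1 f c rest := by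
        rw [List.foldl_cons]
        have h0 : pvAStep ([], none) (f, c) = (([] : List (Int × Int)) ++ [(f, c)], some f) := rfl
        rw [h0, pvALoop_merge rest [] f c, List.nil_append]
      rw [h1, pvMerge1_char rest f c hpw]
      -- rename weights over the sorted list to weights over l
      have hWs : ∀ g, pvW ((f, c) :: rest) g = pvW l g := fun g => pvW_perm _ _ hperm g
      simp only [hWs]
      -- filter after map = map after filter
      rw [List.filter_map]
      -- the sorted distinct keys are exactly the dedup of the sorted list's keys
      have hmemfst : ∀ x : Int, x ∈ ((f, c) :: rest).map Prod.fst ↔ x ∈ l.map Prod.fst := by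
        intro x
        exact (List.Perm.map Prod.fst hperm).mem_iff
      have hpermK : (PySem.List.dedup (((f, c) :: rest).map Prod.fst)).Perm
          (PySem.Set.ofList (l.map Prod.fst)) := by
        rw [List.perm_ext_iff_of_nodup (PySem.List.nodup_dedup _) (PySem.Set.nodup_ofList _)]
        intro x
        rw [PySem.List.mem_dedup, PySem.Set.mem_ofList]
        exact hmemfst x
      have hlt : (PySem.List.dedup (((f, c) :: rest).map Prod.fst)).Pairwise (· < ·) :=
        pvDedupLt _ (List.pairwise_map.mpr hpw)
      have hdd := PySem.List.sorted_eq_of_perm_of_pairwise_lt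
        (PySem.Set.ofList (l.map Prod.fst)) (PySem.List.dedup (((f, c) :: rest).map Prod.fst))
        (fun x => x) hpermK (by simpa using hlt)
      rw [hdd]
      simp [Function.comp_def]
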